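-- pv_equiv track=rewrite | github.com/skandal1st/elements | backend/modules/hr/services/ad_employee_sync.py | _ldap_escape
-- ===== SOURCE A (Python) =====
-- def _ldap_escape(v: str) -> str:
--     """
--     RFC4515: экранирование спецсимволов в LDAP фильтре.
--     """
--     out = []
--     for ch in v:
--         if ch == "\\":
--             out.append(r"\5c")
--         elif ch == "*":
--             out.append(r"\2a")
--         elif ch == "(":
--             out.append(r"\28")
--         elif ch == ")":
--             out.append(r"\29")
--         elif ch == "\x00":
--             out.append(r"\00")
--         else:
--             out.append(ch)
--     return "".join(out)
-- ===== SOURCE B (Python) =====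
-- def _ldap_escape(v: str) -> str:
--     """
--     RFC4515: escape LDAP filter special characters via chained replacements.
--     Backslash must be escaped first so later replacements are not double-escaped.
--     """
--     return (
--         v.replace("\\", r"\5c")
--         .replace("*", r"\2a")
--         .replace("(", r"\28")
--         .replace(")", r"\29")
--         .replace("\x00", r"\00")
--     )
-- ===== Notes on version B (the rewrite author's own statement) =====
-- stated objective: faster
-- what changed: Replaced the per-character classifying loop that builds a list and joins it with five chained str.replace passes (backslash replaced first so introduced backslashes are not re-escaped), each pass a single C-level whole-string scan.
import Mathlib
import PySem

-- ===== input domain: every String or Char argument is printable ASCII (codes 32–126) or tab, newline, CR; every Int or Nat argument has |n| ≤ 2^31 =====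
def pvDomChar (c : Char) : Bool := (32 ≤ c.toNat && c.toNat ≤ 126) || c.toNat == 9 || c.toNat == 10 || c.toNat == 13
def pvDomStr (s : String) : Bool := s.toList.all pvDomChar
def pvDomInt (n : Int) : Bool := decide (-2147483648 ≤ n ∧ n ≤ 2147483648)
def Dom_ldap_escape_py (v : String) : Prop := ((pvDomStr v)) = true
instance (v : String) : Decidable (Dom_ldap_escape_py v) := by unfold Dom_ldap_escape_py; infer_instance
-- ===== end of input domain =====

-- B rewrites A's per-character classifying loop as five chained str.replace passes
-- (backslash first); idiomatic, same asymptotic cost.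

-- ===== PORT A =====
-- the body appended for one character ch (the if/elif chain of A)
def ldapEscChar (ch : Char) : String :=
  if ch = '\\' then "\\5c"
  else if ch = '*' then "\\2a"
  else if ch = '(' then "\\28"
  else if ch = ')' then "\\29"
  else if ch = '\x00' then "\\00"
  else String.ofList [ch]

def ldap_escape_py (v : String) : String :=
  let out : List String := v.toList.foldl (fun acc ch => acc ++ [ldapEscChar ch]) []
  PySem.Str.join "" out

-- ===== PORT B =====
def ldap_escape_py_alt (v : String) : String :=
  PySem.Str.replace
    (PySem.Str.replace
      (PySem.Str.replace
        (PySem.Str.replace (PySem.Str.replace v "\\" "\\5c") "*" "\\2a")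
        "(" "\\28")
      ")" "\\29")
    "\x00" "\\00"

-- ===== PRECONDITION & SPEC =====
def Spec_ldap_escape_py (v : String) (out : String) : Prop := out = ldap_escape_py_alt v
instance (v : String) (out : String) : Decidable (Spec_ldap_escape_py v out) := by unfold Spec_ldap_escape_py; infer_instance

-- ===== CLAIM (what is proved, stated in full; the proofs are below) =====
def Claim_equal_ldap_escape_py : Prop := ∀ (v : String), Dom_ldap_escape_py v → Spec_ldap_escape_py v (ldap_escape_py v)

-- ===== LEMMAS AND PROOFS =====

-- per-character substitution performed by one replace pass with a single-char pattern
def substChar (o : Char) (ns : List Char) (c : Char) : List Char :=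
  if c = o then ns else [c]

theorem replace_go_singleton (o : Char) (ns : List Char) :
    ∀ (l : List Char) (fuel : Nat) (acc : List Char), l.length ≤ fuel →
      PySem.Chars.replace.go [o] ns fuel l acc
        = acc.reverse ++ l.flatMap (substChar o ns) := by
  intro l
  induction l with
  | nil =>
      intro fuel acc _
      cases fuel <;> simp [PySem.Chars.replace.go]
  | cons c t ih =>
      intro fuel acc hle
      cases fuel with
      | zero => simp at hle
      | succ f =>
          have hf : t.length ≤ f := by simpa using hle
          by_cases hc : c = o
          · subst hc
            have hpre : [c].isPrefixOf (c :: t) = true := by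
              simp [List.isPrefixOf]
            simp only [PySem.Chars.replace.go, hpre, if_true, List.length_cons,
              List.length_nil, List.drop_succ_cons, List.drop_zero]
            rw [ih f (ns.reverse ++ acc) hf]
            simp [substChar]
          · have hpre : [o].isPrefixOf (c :: t) = false := by
              simp [List.isPrefixOf]
              intro h; exact hc h.symm
            simp only [PySem.Chars.replace.go, hpre]
            rw [ih f (c :: acc) hf]
            simp [substChar, hc]

theorem replace_singleton (o : Char) (ns : List Char) (l : List Char) :
    PySem.Chars.replace l [o] ns = l.flatMap (substChar o ns) := by
  have h := replace_go_singleton o ns l l.length [] (le_refl _)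
  simpa [PySem.Chars.replace] using h

theorem join_nil_eq_flatten (parts : List (List Char)) :
    PySem.Chars.join [] parts = parts.flatten := by
  induction parts with
  | nil => simp [PySem.Chars.join, List.intercalate]
  | cons p ps ih =>
      cases ps with
      | nil => simp [PySem.Chars.join, List.intercalate]
      | cons q qs =>
          rw [PySem.Chars.join_cons_cons, ih]
          simp

theorem toList_eq_imp_eq (s t : String) (h : s.toList = t.toList) : s = t := by
  have h2 := congrArg String.ofList h
  simpa using h2

theorem ldap_escape_py_toList (v : String) :
    (ldap_escape_py v).toList = v.toList.flatMap (fun c => (ldapEscChar c).toList) := by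
  unfold ldap_escape_py
  rw [PySem.Str.toList_join]
  rw [PySem.List.foldl_append_singleton_eq_map]
  have h0 : ("" : String).toList = ([] : List Char) := rfl
  rw [h0]
  simp only [List.nil_append, List.map_map]
  rw [join_nil_eq_flatten, List.flatMap_def]
  rfl

theorem subst_compose (c : Char) :
    (substChar '\\' "\\5c".toList c).flatMap (fun x =>
      (substChar '*' "\\2a".toList x).flatMap (fun x =>
        (substChar '(' "\\28".toList x).flatMap (fun x =>
          (substChar ')' "\\29".toList x).flatMap
            (substChar '\x00' "\\00".toList)))) = (ldapEscChar c).toList := by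
  by_cases h1 : c = '\\'
  · subst h1; decide
  · by_cases h2 : c = '*'
    · subst h2; decide
    · by_cases h3 : c = '('
      · subst h3; decide
      · by_cases h4 : c = ')'
        · subst h4; decide
        · by_cases h5 : c = '\x00'
          · subst h5; decide
          · simp [substChar, ldapEscChar, h1, h2, h3, h4, h5]

theorem ldap_escape_py_alt_toList (v : String) :
    (ldap_escape_py_alt v).toList = v.toList.flatMap (fun c => (ldapEscChar c).toList) := by
  unfold ldap_escape_py_alt
  rw [PySem.Str.toList_replace, PySem.Str.toList_replace, PySem.Str.toList_replace,
      PySem.Str.toList_replace, PySem.Str.toList_replace]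
  have hbs : ("\\" : String).toList = ['\\'] := by decide
  have hst : ("*" : String).toList = ['*'] := by decide
  have hop : ("(" : String).toList = ['('] := by decide
  have hcp : (")" : String).toList = [')'] := by decide
  have hnl : ("\x00" : String).toList = ['\x00'] := by decide
  rw [hbs, hst, hop, hcp, hnl]
  rw [replace_singleton, replace_singleton, replace_singleton, replace_singleton,
      replace_singleton]
  rw [List.flatMap_assoc, List.flatMap_assoc, List.flatMap_assoc, List.flatMap_assoc]
  apply List.flatMap_congr
  intro c _
  exact subst_compose c

-- ===== VERDICT (by name: the statement is the Claim_ definition above) =====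
theorem ldap_escape_py_spec : Claim_equal_ldap_escape_py := by
  intro v _
  unfold Spec_ldap_escape_py
  apply toList_eq_imp_eq
  rw [ldap_escape_py_toList, ldap_escape_py_alt_toList]
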